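-- pv_equiv track=rewrite | github.com/DilumikaNawodya/GUI-Detection | backend/UIDM/KnowledgeBase/Components/Tabs.py | tab_rows
-- ===== SOURCE A (Python) =====
-- def tab_rows(embeddedtext):
--     height = embeddedtext[0]['height']
--     height_consistency = True
--     for i in range(1, len(embeddedtext)):
--         if embeddedtext[i]['height'] != height:
--             height_consistency = False
--     if (height_consistency == False):
--         return 14
--     return -1
-- ===== SOURCE B (Python) =====
-- def tab_rows(embeddedtext):
--     distinct = {d['height'] for d in embeddedtext}
--     return 14 if len(distinct) > 1 else -1
-- ===== Notes on version B (the rewrite author's own statement) =====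
-- stated objective: simpler
-- what changed: Instead of comparing each later row's height to the first row's height while updating a mutable flag, B builds the set of all distinct heights in one comprehension and returns 14 exactly when it has more than one element.
import Mathlib
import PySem

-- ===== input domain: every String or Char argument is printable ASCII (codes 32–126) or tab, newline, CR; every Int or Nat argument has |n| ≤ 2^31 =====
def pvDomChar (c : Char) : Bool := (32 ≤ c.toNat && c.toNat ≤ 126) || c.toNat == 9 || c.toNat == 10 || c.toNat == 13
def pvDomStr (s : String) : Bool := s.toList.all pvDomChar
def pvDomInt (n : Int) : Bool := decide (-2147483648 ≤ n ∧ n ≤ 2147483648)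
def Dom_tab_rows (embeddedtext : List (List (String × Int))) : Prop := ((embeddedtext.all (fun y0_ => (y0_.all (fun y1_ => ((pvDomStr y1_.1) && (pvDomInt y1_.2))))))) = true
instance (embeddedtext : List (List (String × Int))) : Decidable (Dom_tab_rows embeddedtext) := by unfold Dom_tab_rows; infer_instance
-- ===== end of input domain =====

-- B replaces A's reference-height-plus-mutable-flag scan by building the set of distinct
-- heights once and making a single cardinality decision (objective: simpler).

-- ===== PORT A =====
-- d['height'] for a row (dict ≅ assoc list)
def pvHeight? (row : List (String × Int)) : Option Int := (PySem.Dict.mk row).get? "height"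

def tab_rows (embeddedtext : List (List (String × Int))) : Int :=
  -- height = embeddedtext[0]['height']  (IndexError/KeyError → outside Pre_; 0 is junk there)
  match PySem.List.pyGet? embeddedtext 0 with
  | none => 0
  | some row0 =>
    match pvHeight? row0 with
    | none => 0
    | some height =>
      -- for i in range(1, len(embeddedtext)): if embeddedtext[i]['height'] != height: flag = False
      let flag :=
        (PySem.List.pyRange 1 (embeddedtext.length : Int) 1).foldl
          (fun acc i =>
            match pvHeight? (PySem.List.pyGetD embeddedtext i []) with
            | some hi => if hi ≠ height then false else acc
            | none => acc)   -- KeyError → outside Pre_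
          true
      if flag = false then 14 else -1

-- ===== PORT B =====
def tab_rows_alt (embeddedtext : List (List (String × Int))) : Int :=
  -- distinct = {d['height'] for d in embeddedtext}   (KeyError → outside Pre_)
  let distinct : PySem.Set Int := PySem.Set.ofList (embeddedtext.filterMap pvHeight?)
  if distinct.length > 1 then 14 else -1

-- ===== PRECONDITION & SPEC =====
-- Pre_ excludes exactly the inputs on which A raises: the empty list (IndexError) and
-- rows without a 'height' key (KeyError).
def Pre_tab_rows (embeddedtext : List (List (String × Int))) : Prop :=
  embeddedtext ≠ [] ∧ ∀ row ∈ embeddedtext, (pvHeight? row).isSome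
instance (embeddedtext : List (List (String × Int))) : Decidable (Pre_tab_rows embeddedtext) := by unfold Pre_tab_rows; infer_instance

def pvWitness_tab_rows : (List (List (String × Int))) := [[("height", 3)], [("height", 4)]]

def Spec_tab_rows (embeddedtext : List (List (String × Int))) (out : Int) : Prop := out = tab_rows_alt embeddedtext
instance (embeddedtext : List (List (String × Int))) (out : Int) : Decidable (Spec_tab_rows embeddedtext out) := by unfold Spec_tab_rows; infer_instance

-- ===== CLAIM (what is proved, stated in full; the proofs are below) =====
def Claim_equal_tab_rows : Prop := ∀ (embeddedtext : List (List (String × Int))), Dom_tab_rows embeddedtext → Pre_tab_rows embeddedtext → Spec_tab_rows embeddedtext (tab_rows embeddedtext)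

-- ===== LEMMAS AND PROOFS =====

-- A's flag loop over a row list: it is 'init && all heights found equal h'.
lemma flag_foldl_eq (h : Int) (rest : List (List (String × Int))) (b : Bool) :
    rest.foldl
      (fun acc row =>
        match pvHeight? row with
        | some hi => if hi ≠ h then false else acc
        | none => acc) b
    = (b && rest.all (fun row =>
        match pvHeight? row with
        | some hi => hi == h
        | none => true)) := by
  induction rest generalizing b with
  | nil => simp
  | cons r t ih =>
    simp only [List.foldl_cons, List.all_cons]
    cases hr : pvHeight? r with
    | none => rw [ih]; simp
    | some hi =>
      by_cases hne : hi = h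
      · subst hne; rw [ih]; simp
      · simp only [if_pos hne]; rw [ih]; simp [hne]

-- two distinct members force length ≥ 2
lemma two_mem_length (l : List Int) {x y : Int} (hx : x ∈ l) (hy : y ∈ l) (hxy : x ≠ y) :
    1 < l.length := by
  match l with
  | [] => simp at hx
  | [a] =>
    simp at hx hy; subst hx; subst hy; exact absurd rfl hxy
  | a :: b :: t => simp

-- when every value equals h, the set {h, vals…} is just [h]
lemma ofList_all_eq (h : Int) (vals : List Int) (hall : ∀ x ∈ vals, x = h) :
    PySem.Set.ofList (h :: vals) = [h] := by
  have : ∀ (t : List Int), (∀ x ∈ t, x = h) → t.foldl PySem.Set.add [h] = [h] := by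
    intro t
    induction t with
    | nil => intro _; rfl
    | cons a t ih =>
      intro hall
      have ha : a = h := hall a (by simp)
      subst ha
      simpa [PySem.Set.add, PySem.Set.contains] using ih (fun x hx => hall x (by simp [hx]))
  rw [PySem.Set.ofList_eq_foldl]
  simpa [PySem.Set.add, PySem.Set.empty, PySem.Set.contains] using this vals hall

-- ===== VERDICT =====
theorem tab_rows_spec : Claim_equal_tab_rows := by
  intro e _ hpre
  obtain ⟨hne, hkeys⟩ := hpre
  obtain ⟨r0, rest, rfl⟩ := List.exists_cons_of_ne_nil hne
  obtain ⟨h, hh⟩ := Option.isSome_iff_exists.mp (hkeys r0 (by simp))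
  unfold Spec_tab_rows tab_rows tab_rows_alt
  have hget0 : PySem.List.pyGet? (r0 :: rest) 0 = some r0 := by
    simp [PySem.List.pyGet?, PySem.List.pyIdx?]
  rw [hget0]
  simp only [hh]
  -- convert A's index loop to a fold over the tail
  rw [PySem.List.foldl_pyRange_pyGetD' (r0 :: rest) []
        (fun acc row =>
          match pvHeight? row with
          | some hi => if hi ≠ h then false else acc
          | none => acc) true (a := 1) (by norm_num)]
  simp only [show ((1 : Int).toNat) = 1 from rfl, List.drop_one, List.tail_cons]
  rw [flag_foldl_eq]
  -- B's set
  have hfm : (r0 :: rest).filterMap pvHeight? = h :: rest.filterMap pvHeight? := by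
    simp [hh]
  rw [hfm]
  set vals := rest.filterMap pvHeight? with hvals
  by_cases hall : ∀ x ∈ vals, x = h
  · -- all equal: flag stays true, set is [h]
    have hallb : rest.all (fun row =>
        match pvHeight? row with
        | some hi => hi == h
        | none => true) = true := by
      rw [List.all_eq_true]
      intro row hrow
      cases hr : pvHeight? row with
      | none => simp
      | some hi =>
        have : hi ∈ vals := by
          rw [hvals, List.mem_filterMap]; exact ⟨row, hrow, hr⟩
        simp [hall hi this]
    rw [ofList_all_eq h vals hall]
    simp [hallb]
  · -- some value differs: flag becomes false, set has ≥ 2 elements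
    rw [not_forall] at hall
    simp only [not_forall, exists_prop] at hall
    obtain ⟨x, hxv, hxh⟩ := hall
    obtain ⟨row, hrow, hr⟩ := List.mem_filterMap.mp (hvals ▸ hxv)
    have hallb : rest.all (fun row =>
        match pvHeight? row with
        | some hi => hi == h
        | none => true) = false := by
      rw [List.all_eq_false]
      refine ⟨row, hrow, ?_⟩
      simp [hr, hxh]
    have hlen : 1 < (PySem.Set.ofList (h :: vals)).length := by
      apply two_mem_length _ (x := h) (y := x)
      · exact (PySem.Set.mem_ofList _ _).mpr (by simp)
      · exact (PySem.Set.mem_ofList _ _).mpr (by simp [hxv])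
      · exact fun heq => hxh heq.symm
    simp [hallb, hlen]
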